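-- pv_equiv track=rewrite | github.com/siheming/mspypeline | mspypeline/helpers/Utils.py | venn_names
-- ===== SOURCE A (Python) =====
-- from typing import Optional, Dict, Tuple, Iterator, Union, Iterable, Sized
-- from itertools import combinations
--
-- def venn_names(named_sets: Dict[str, set]) -> Iterator[Tuple[set, set, set]]:
--     names = set(named_sets)
--     for i in range(1, len(named_sets) + 1):
--         for to_intersect in combinations(sorted(named_sets), i):
--             others = names.difference(to_intersect)
--             intersected = set.intersection(*(named_sets[k] for k in to_intersect))
--             unioned = set.union(*(named_sets[k] for k in others)) if others else set()
--             yield to_intersect, others, intersected - unioned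
-- ===== SOURCE B (Python) =====
-- from itertools import combinations
--
-- def venn_names(named_sets):
--     names = set(named_sets)
--     order = sorted(named_sets)
--     # bucket: element -> list of the names (in sorted order) whose set contains it
--     containing = {}
--     for name in order:
--         for x in named_sets[name]:
--             containing.setdefault(x, []).append(name)
--     # group elements by their exact membership signature
--     regions = {}
--     for x, sig in containing.items():
--         regions.setdefault(tuple(sig), set()).add(x)
--     for i in range(1, len(order) + 1):
--         for to_intersect in combinations(order, i):
--             yield to_intersect, names.difference(to_intersect), regions.get(to_intersect, set())
-- ===== Notes on version B (the rewrite author's own statement) =====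
-- stated objective: alternative
-- what changed: Instead of recomputing an intersection of the chosen sets and a union of all the other sets for every one of the 2^n combinations, B makes one pass over the data to bucket every element under its exact membership signature (the list of names whose set contains it, in sorted-name order) and then answers each combination by a single dictionary lookup; since the output itself has 2^n entries, this is not measurably faster on the timed inputs.
import Mathlib
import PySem

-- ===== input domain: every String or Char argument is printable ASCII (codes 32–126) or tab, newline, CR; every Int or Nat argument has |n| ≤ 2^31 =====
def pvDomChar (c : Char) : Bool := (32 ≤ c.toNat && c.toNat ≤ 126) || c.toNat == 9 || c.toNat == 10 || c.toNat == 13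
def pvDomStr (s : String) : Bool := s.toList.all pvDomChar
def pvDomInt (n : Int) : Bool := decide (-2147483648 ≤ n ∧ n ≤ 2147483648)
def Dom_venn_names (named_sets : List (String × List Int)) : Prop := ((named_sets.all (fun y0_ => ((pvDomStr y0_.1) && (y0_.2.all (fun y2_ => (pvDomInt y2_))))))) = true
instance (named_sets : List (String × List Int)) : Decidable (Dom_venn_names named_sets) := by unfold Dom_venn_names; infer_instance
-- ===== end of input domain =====

-- B buckets every element once by its exact membership signature and answers each of the
-- 2^n combinations by a dictionary lookup, instead of A's per-combination intersections/unions.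

-- ===== PORT A =====
-- named_sets[k] (a Python set value) looked up in the dict
def vn_S (d : PySem.Dict String (List Int)) (k : String) : PySem.Set Int :=
  PySem.Set.ofList (d.getD k [])

-- set.intersection(*(named_sets[k] for k in to_intersect))
def vn_inter (d : PySem.Dict String (List Int)) : List String → PySem.Set Int
  | [] => PySem.Set.empty
  | k :: rest => rest.foldl (fun acc k' => PySem.Set.inter acc (vn_S d k')) (vn_S d k)

-- set.union(*(named_sets[k] for k in others))
def vn_union (d : PySem.Dict String (List Int)) : List String → PySem.Set Int
  | [] => PySem.Set.empty
  | k :: rest => rest.foldl (fun acc k' => PySem.Set.union acc (vn_S d k')) (vn_S d k)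

def venn_names (named_sets : List (String × List Int)) : List (List String × List String × List Int) :=
  let d := PySem.Dict.ofList named_sets
  let names : PySem.Set String := PySem.Set.ofList d.keys
  (PySem.List.pyRange 1 ((d.keys.length : Int) + 1) 1).foldl (fun acc i =>
    acc ++ (PySem.List.combinations (PySem.List.sorted d.keys (fun k => k) false) i.toNat).map
      (fun to_intersect =>
        let others := PySem.Set.diff names to_intersect
        let intersected := vn_inter d to_intersect
        let unioned := if others = [] then PySem.Set.empty else vn_union d others
        (to_intersect, others, PySem.Set.diff intersected unioned))) []

-- ===== PORT B =====
def venn_names_alt (named_sets : List (String × List Int)) : List (List String × List String × List Int) :=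
  let d := PySem.Dict.ofList named_sets
  let names : PySem.Set String := PySem.Set.ofList d.keys
  let order := PySem.List.sorted d.keys (fun k => k) false
  -- containing.setdefault(x, []).append(name)
  let containing : PySem.Dict Int (List String) :=
    order.foldl (fun cd name =>
      (vn_S d name).foldl (fun cd x => cd.modify x [] (fun l => l ++ [name])) cd) PySem.Dict.empty
  -- regions.setdefault(tuple(sig), set()).add(x)
  let regions : PySem.Dict (List String) (List Int) :=
    containing.items.foldl (fun rd p =>
      rd.modify p.2 PySem.Set.empty (fun s => PySem.Set.add s p.1)) PySem.Dict.empty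
  (PySem.List.pyRange 1 ((d.keys.length : Int) + 1) 1).foldl (fun acc i =>
    acc ++ (PySem.List.combinations order i.toNat).map
      (fun to_intersect =>
        (to_intersect, PySem.Set.diff names to_intersect,
          regions.getD to_intersect PySem.Set.empty))) []

-- ===== PRECONDITION & SPEC =====
def Spec_venn_names (named_sets : List (String × List Int)) (out : List (List String × List String × List Int)) : Prop := out = venn_names_alt named_sets
instance (named_sets : List (String × List Int)) (out : List (List String × List String × List Int)) : Decidable (Spec_venn_names named_sets out) := by unfold Spec_venn_names; infer_instance

-- ===== CLAIM (what is proved, stated in full; the proofs are below) =====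
def Claim_equal_venn_names : Prop := ∀ (named_sets : List (String × List Int)), Dom_venn_names named_sets → Spec_venn_names named_sets (venn_names named_sets)

-- ===== LEMMAS AND PROOFS =====

-- `==` on lists of strings is propositional equality, decided
theorem vn_beq_eq (a b : List String) : (a == b) = decide (a = b) := by
  by_cases h : a = b <;> simp [h]

-- each stored set is duplicate-free
theorem vn_S_nodup (d : PySem.Dict String (List Int)) (k : String) : (vn_S d k).Nodup :=
  PySem.Set.nodup_ofList _

-- filtering a duplicate-free list by membership in one of its sublists returns the sublist
theorem vn_filter_mem_of_sublist {α : Type} [DecidableEq α] {c l : List α}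
    (h : c.Sublist l) (hn : l.Nodup) : l.filter (fun k => decide (k ∈ c)) = c := by
  induction h with
  | slnil => rfl
  | @cons l₁ l₂ a h ih =>
      have ha : a ∉ l₁ := fun hm => (List.nodup_cons.mp hn).1 (h.subset hm)
      rw [List.filter_cons]
      simp only [ha, decide_false, Bool.false_eq_true, if_false]
      exact ih (List.nodup_cons.mp hn).2
  | @cons₂ l₁ l₂ a h ih =>
      have ha : a ∉ l₂ := (List.nodup_cons.mp hn).1
      have hcong : l₂.filter (fun k => decide (k ∈ a :: l₁)) = l₂.filter (fun k => decide (k ∈ l₁)) := by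
        refine List.filter_congr fun k hk => ?_
        have hka : k ≠ a := fun e => ha (e ▸ hk)
        simp [List.mem_cons, hka]
      rw [List.filter_cons, if_pos (by simp : (decide (a ∈ a :: l₁)) = true), hcong,
        ih (List.nodup_cons.mp hn).2]

theorem vn_filter_eq_of_iff {α : Type} [DecidableEq α] {c l : List α} (hsub : c.Sublist l)
    (hn : l.Nodup) {p : α → Bool} (h : ∀ k ∈ l, (p k = true ↔ k ∈ c)) : l.filter p = c := by
  have hcong : l.filter p = l.filter (fun k => decide (k ∈ c)) := by
    refine List.filter_congr fun k hk => ?_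
    by_cases hkc : k ∈ c
    · simp [hkc, (h k hk).mpr hkc]
    · simp only [hkc, decide_false]
      cases hp : p k with
      | false => rfl
      | true => exact absurd ((h k hk).mp hp) hkc
  rw [hcong]; exact vn_filter_mem_of_sublist hsub hn

theorem vn_iff_of_filter_eq {α : Type} {c l : List α} {p : α → Bool}
    (h : l.filter p = c) : ∀ k ∈ l, (p k = true ↔ k ∈ c) := by
  intro k hk
  constructor
  · intro hp; rw [← h]; exact List.mem_filter.mpr ⟨hk, hp⟩
  · intro hkc; rw [← h] at hkc; exact (List.mem_filter.mp hkc).2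

-- A's chained intersections are one filter over the first set
theorem vn_inter_foldl (d : PySem.Dict String (List Int)) (l : List String) (s : List Int) :
    l.foldl (fun acc k => PySem.Set.inter acc (vn_S d k)) s
      = s.filter (fun x => l.all (fun k => (vn_S d k).contains x)) := by
  induction l generalizing s with
  | nil => simp
  | cons k tl ih =>
      rw [List.foldl_cons, ih]
      show (List.filter _ (PySem.Set.inter s (vn_S d k))) = _
      rw [show PySem.Set.inter s (vn_S d k) = s.filter (fun x => (vn_S d k).contains x) from rfl,
        List.filter_filter]
      refine List.filter_congr fun x _ => ?_
      simp [List.all_cons, Bool.and_comm]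

-- membership in A's chained unions
theorem vn_mem_union_foldl (d : PySem.Dict String (List Int)) (l : List String)
    (s : PySem.Set Int) (x : Int) :
    x ∈ l.foldl (fun acc k => PySem.Set.union acc (vn_S d k)) s ↔ x ∈ s ∨ ∃ k ∈ l, x ∈ vn_S d k := by
  induction l generalizing s with
  | nil => simp
  | cons k tl ih =>
      rw [List.foldl_cons, ih]
      rw [show PySem.Set.union s (vn_S d k) = PySem.Set.update s (vn_S d k) from rfl]
      rw [PySem.Set.mem_update]
      constructor
      · rintro (⟨h | h⟩ | ⟨k', hk', hx⟩)
        · exact Or.inl h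
        · exact Or.inr ⟨k, by simp, h⟩
        · exact Or.inr ⟨k', by simp [hk'], hx⟩
      · rintro (h | ⟨k', hk', hx⟩)
        · exact Or.inl (Or.inl h)
        · rcases List.mem_cons.mp hk' with rfl | hk'
          · exact Or.inl (Or.inr hx)
          · exact Or.inr ⟨k', hk', hx⟩

theorem vn_mem_union (d : PySem.Dict String (List Int)) (O : List String) (x : Int) :
    x ∈ vn_union d O ↔ ∃ k ∈ O, x ∈ vn_S d k := by
  cases O with
  | nil => simp [vn_union, PySem.Set.empty]
  | cons o tl =>
      show x ∈ tl.foldl (fun acc k => PySem.Set.union acc (vn_S d k)) (vn_S d o) ↔ _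
      rw [vn_mem_union_foldl]
      constructor
      · rintro (h | ⟨k, hk, hx⟩)
        · exact ⟨o, by simp, h⟩
        · exact ⟨k, by simp [hk], hx⟩
      · rintro ⟨k, hk, hx⟩
        rcases List.mem_cons.mp hk with rfl | hk
        · exact Or.inl hx
        · exact Or.inr ⟨k, hk, hx⟩

-- filter commutes with Set.add / with building a set
theorem vn_filter_add {α : Type} [BEq α] [LawfulBEq α] (s : PySem.Set α) (x : α) (p : α → Bool) :
    (PySem.Set.add s x).filter p = if p x then PySem.Set.add (s.filter p) x else s.filter p := by
  by_cases hx : x ∈ s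
  · rw [PySem.Set.add_of_mem hx]
    by_cases hp : p x
    · rw [if_pos hp, PySem.Set.add_of_mem (List.mem_filter.mpr ⟨hx, hp⟩)]
    · rw [if_neg hp]
  · rw [PySem.Set.add_of_not_mem hx, List.filter_append]
    by_cases hp : p x
    · rw [if_pos hp, PySem.Set.add_of_not_mem (fun hm => hx (List.mem_filter.mp hm).1)]
      simp [hp]
    · rw [if_neg hp]
      simp [hp]

theorem vn_filter_foldl_add {α : Type} [BEq α] [LawfulBEq α] (l : List α) (s : PySem.Set α) (p : α → Bool) :
    (l.foldl PySem.Set.add s).filter p = (l.filter p).foldl PySem.Set.add (s.filter p) := by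
  induction l generalizing s with
  | nil => rfl
  | cons x tl ih =>
      rw [List.foldl_cons, ih, vn_filter_add, List.filter_cons]
      by_cases hp : p x <;> simp [hp]

theorem vn_filter_ofList {α : Type} [BEq α] [LawfulBEq α] (l : List α) (p : α → Bool) :
    (PySem.Set.ofList l).filter p = PySem.Set.ofList (l.filter p) := by
  rw [PySem.Set.ofList_eq_foldl, PySem.Set.ofList_eq_foldl, vn_filter_foldl_add]; rfl

theorem vn_foldl_add_absorb {α : Type} [BEq α] [LawfulBEq α] (v : List α) (s : PySem.Set α)
    (h : ∀ x ∈ v, x ∈ s) : v.foldl PySem.Set.add s = s := by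
  induction v generalizing s with
  | nil => rfl
  | cons x tl ih =>
      rw [List.foldl_cons, PySem.Set.add_of_mem (h x (by simp))]
      exact ih _ fun y hy => h y (by simp [hy])

theorem vn_ofList_append_absorb {α : Type} [BEq α] [LawfulBEq α] (u v : List α)
    (h : ∀ x ∈ v, x ∈ u) : PySem.Set.ofList (u ++ v) = PySem.Set.ofList u := by
  rw [PySem.Set.ofList_eq_foldl, List.foldl_append, ← PySem.Set.ofList_eq_foldl]
  exact vn_foldl_add_absorb v _ fun x hx => (PySem.Set.mem_ofList u x).mpr (h x hx)

-- filtering a duplicate-free list for one value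
theorem vn_filter_beq (s : List Int) (hn : s.Nodup) (x : Int) :
    s.filter (fun y => y == x) = if x ∈ s then [x] else [] := by
  induction s with
  | nil => simp
  | cons y tl ih =>
      rw [List.filter_cons]
      by_cases hy : y = x
      · subst hy
        have hx : y ∉ tl := (List.nodup_cons.mp hn).1
        have hnil : tl.filter (fun z => z == y) = [] :=
          List.filter_eq_nil_iff.mpr fun a ha hb =>
            hx (by rwa [show a = y from by simpa using hb] at ha)
        simp [hnil, hx]
      · have hyx : ¬ x = y := fun e => hy e.symm
        simp [hy, hyx, ih (List.nodup_cons.mp hn).2]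

theorem vn_filter_eq_flatMap {α : Type} (l : List α) (p : α → Bool) :
    l.filter p = l.flatMap (fun k => if p k then [k] else []) := by
  induction l with
  | nil => rfl
  | cons a tl ih =>
      rw [List.filter_cons, List.flatMap_cons, ← ih]
      by_cases hp : p a <;> simp [hp]

theorem vn_flatMap_single {α β : Type} [DecidableEq α] {l : List α} {a : α} (hn : l.Nodup)
    (ha : a ∈ l) (ys : List β) : l.flatMap (fun k => if k = a then ys else []) = ys := by
  induction l with
  | nil => cases ha
  | cons b tl ih =>
      rw [List.flatMap_cons]
      by_cases hb : b = a
      · subst hb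
        rw [if_pos rfl]
        have hnil : tl.flatMap (fun k => if k = b then ys else []) = [] := by
          rw [List.flatMap_eq_nil_iff]
          intro k hk
          exact if_neg fun (e : k = b) => (List.nodup_cons.mp hn).1 (e ▸ hk)
        rw [hnil, List.append_nil]
      · rw [if_neg hb, List.nil_append]
        have ha' : a ∈ tl := by
          rcases List.mem_cons.mp ha with rfl | h
          · exact absurd rfl hb
          · exact h
        exact ih (List.nodup_cons.mp hn).2 ha'

-- grouping loop with Set.add: lookup is an update by the matching elements
theorem vn_getD_foldl_modify_add (l : List (Int × List String))
    (rd : PySem.Dict (List String) (List Int)) (c : List String) :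
    (l.foldl (fun rd p => rd.modify p.2 PySem.Set.empty (fun s => PySem.Set.add s p.1)) rd).getD c PySem.Set.empty
      = PySem.Set.update (rd.getD c PySem.Set.empty) ((l.filter (fun p => p.2 == c)).map (fun p => p.1)) := by
  induction l generalizing rd with
  | nil => rfl
  | cons p tl ih =>
      rw [List.foldl_cons, ih, List.filter_cons, PySem.Dict.getD_modify]
      by_cases hc : p.2 = c
      · subst hc
        rw [if_pos (show p.2 = p.2 from rfl), if_pos (show (p.2 == p.2) = true by simp),
          List.map_cons]
        rfl
      · rw [if_neg (show ¬ c = p.2 from fun e => hc e.symm),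
          if_neg (show ¬ (p.2 == c) = true by simp [hc])]

-- the containing dict: one lookup is the membership signature
theorem vn_containing_getD (d : PySem.Dict String (List Int)) (L : List String) (x : Int) :
    (L.foldl (fun cd name => (vn_S d name).foldl (fun cd x => cd.modify x [] (fun l => l ++ [name])) cd)
        (PySem.Dict.empty : PySem.Dict Int (List String))).getD x []
      = L.filter (fun k => (vn_S d k).contains x) := by
  have hfun : (fun (cd : PySem.Dict Int (List String)) name =>
        (vn_S d name).foldl (fun cd x => cd.modify x [] (fun l => l ++ [name])) cd)
      = (fun cd name => ((vn_S d name).map (fun x => (x, name))).foldl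
        (fun cd p => cd.modify p.1 [] (fun l => l ++ [p.2])) cd) := by
    funext cd name
    rw [List.foldl_map]
  rw [hfun, ← List.foldl_flatMap, PySem.Dict.getD_foldl_modify_append, PySem.Dict.getD_empty,
    List.nil_append, List.filter_flatMap, List.map_flatMap]
  rw [vn_filter_eq_flatMap L (fun k => (vn_S d k).contains x)]
  refine List.flatMap_congr fun k _ => ?_
  rw [List.filter_map, List.map_map]
  have : ((fun x => x.2) ∘ fun y => ((y, k) : Int × String)) = fun _ => k := rfl
  rw [show ((fun (p : Int × String) => p.1 == x) ∘ fun y => ((y, k) : Int × String)) = fun y => y == x from rfl]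
  rw [vn_filter_beq (vn_S d k) (vn_S_nodup d k) x]
  by_cases hm : x ∈ vn_S d k
  · simp [hm]
  · simp [hm]

-- the containing dict: its keys are all elements in first-occurrence order
theorem vn_containing_keys (d : PySem.Dict String (List Int)) (L : List String) :
    (L.foldl (fun cd name => (vn_S d name).foldl (fun cd x => cd.modify x [] (fun l => l ++ [name])) cd)
        (PySem.Dict.empty : PySem.Dict Int (List String))).keys
      = PySem.Set.ofList (L.flatMap (fun k => vn_S d k)) := by
  have hfun : (fun (cd : PySem.Dict Int (List String)) name =>
        (vn_S d name).foldl (fun cd x => cd.modify x [] (fun l => l ++ [name])) cd)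
      = (fun cd name => ((vn_S d name).map (fun x => (x, name))).foldl
        (fun cd p => cd.modify p.1 [] (fun l => l ++ [p.2])) cd) := by
    funext cd name
    rw [List.foldl_map]
  rw [hfun, ← List.foldl_flatMap]
  refine Eq.trans (PySem.Dict.keys_foldl_modify_key
      (l := L.flatMap (fun name => (vn_S d name).map (fun x => (x, name))))
      (key := fun (p : Int × String) => p.1) (d0 := ([] : List String))
      (f := fun _ p => fun l => l ++ [p.2]) (d := PySem.Dict.empty)) ?_
  rw [PySem.Dict.keys_empty, PySem.Set.update_nil_left, List.map_flatMap]
  congr 1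
  refine List.flatMap_congr fun k _ => ?_
  rw [List.map_map]
  exact List.map_id _

-- B's region lookup is the signature filter over all elements
theorem vn_B_side (d : PySem.Dict String (List Int)) (L : List String) (c : List String) :
    (((L.foldl (fun cd name => (vn_S d name).foldl (fun cd x => cd.modify x [] (fun l => l ++ [name])) cd)
          (PySem.Dict.empty : PySem.Dict Int (List String))).items.foldl
        (fun rd p => rd.modify p.2 PySem.Set.empty (fun s => PySem.Set.add s p.1))
        (PySem.Dict.empty : PySem.Dict (List String) (List Int))).getD c PySem.Set.empty)
      = (PySem.Set.ofList (L.flatMap (fun k => vn_S d k))).filter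
          (fun x => (L.filter (fun k => (vn_S d k).contains x)) == c) := by
  set C := L.foldl (fun cd name => (vn_S d name).foldl (fun cd x => cd.modify x [] (fun l => l ++ [name])) cd)
      (PySem.Dict.empty : PySem.Dict Int (List String)) with hC
  have hkeys : C.keys = PySem.Set.ofList (L.flatMap (fun k => vn_S d k)) := vn_containing_keys d L
  have hnd : C.keys.Nodup := by rw [hkeys]; exact PySem.Set.nodup_ofList _
  have hitems : C.items = (PySem.Set.ofList (L.flatMap (fun k => vn_S d k))).map
      (fun x => (x, L.filter (fun k => (vn_S d k).contains x))) := by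
    rw [PySem.Dict.items_eq_map_keys C hnd [], hkeys]
    exact List.map_congr_left fun x _ => by rw [vn_containing_getD d L x]
  have hupd : ∀ xs : List Int, (PySem.Set.empty : PySem.Set Int).update xs = PySem.Set.ofList xs :=
    fun xs => PySem.Set.update_nil_left xs
  rw [vn_getD_foldl_modify_add, PySem.Dict.getD_empty, hupd, hitems]
  rw [List.filter_map, List.map_map]
  rw [show ((fun (p : Int × List String) => p.2 == c) ∘
      fun x => (x, L.filter (fun k => (vn_S d k).contains x)))
      = fun x => (L.filter (fun k => (vn_S d k).contains x)) == c from rfl]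
  rw [show ((fun (p : Int × List String) => p.1) ∘
      fun x => (x, L.filter (fun k => (vn_S d k).contains x))) = fun x => x from rfl]
  exact (congrArg PySem.Set.ofList (List.map_id _)).trans
    (PySem.Set.ofList_eq_self_of_nodup _ (List.Nodup.filter _ (PySem.Set.nodup_ofList _)))

-- A's third component as the signature filter over the first chosen set
theorem vn_A_side (d : PySem.Dict String (List Int)) (L : List String) (k0 : String)
    (rest : List String) (hn : L.Nodup) (hmem : ∀ k, k ∈ L ↔ k ∈ d.keys)
    (hsub : (k0 :: rest).Sublist L) :
    PySem.Set.diff (vn_inter d (k0 :: rest))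
        (if PySem.Set.diff (PySem.Set.ofList d.keys) (k0 :: rest) = [] then PySem.Set.empty
         else vn_union d (PySem.Set.diff (PySem.Set.ofList d.keys) (k0 :: rest)))
      = (vn_S d k0).filter (fun x => (L.filter (fun k => (vn_S d k).contains x)) == (k0 :: rest)) := by
  set O := PySem.Set.diff (PySem.Set.ofList d.keys) (k0 :: rest) with hO
  have hOmem : ∀ k, k ∈ O ↔ (k ∈ d.keys ∧ k ∉ (k0 :: rest)) := by
    intro k
    rw [hO, PySem.Set.mem_diff, PySem.Set.mem_ofList]
  have hUmem : ∀ x : Int, x ∈ (if O = [] then PySem.Set.empty else vn_union d O) ↔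
      ∃ k ∈ O, x ∈ vn_S d k := by
    intro x
    split_ifs with h
    · rw [h]; simp [PySem.Set.empty]
    · exact vn_mem_union d O x
  rw [show vn_inter d (k0 :: rest)
      = rest.foldl (fun acc k => PySem.Set.inter acc (vn_S d k)) (vn_S d k0) from rfl]
  rw [vn_inter_foldl]
  rw [show ∀ t : PySem.Set Int, PySem.Set.diff
      ((vn_S d k0).filter (fun x => rest.all (fun k => (vn_S d k).contains x))) t
      = List.filter (fun x => !t.contains x)
          ((vn_S d k0).filter (fun x => rest.all (fun k => (vn_S d k).contains x))) from fun _ => rfl]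
  rw [List.filter_filter]
  refine List.filter_congr fun x hx => ?_
  rw [vn_beq_eq]
  set U := (if O = [] then PySem.Set.empty else vn_union d O) with hU
  have hcont : ∀ k, (vn_S d k).contains x = true ↔ x ∈ vn_S d k := by
    intro k
    simp [PySem.Set.contains]
  have hUc : U.contains x = true ↔ ∃ k ∈ O, x ∈ vn_S d k := by
    rw [show (U.contains x) = (List.contains U x) from rfl]
    rw [List.contains_iff_mem]
    exact hUmem x
  by_cases hq : L.filter (fun k => (vn_S d k).contains x) = (k0 :: rest)
  · have hiff := vn_iff_of_filter_eq hq
    have hall : rest.all (fun k => (vn_S d k).contains x) = true := by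
      rw [List.all_eq_true]
      intro k hk
      exact (hiff k (hsub.subset (List.mem_cons_of_mem _ hk))).mpr (List.mem_cons_of_mem _ hk)
    have hnu : U.contains x = false := by
      rw [Bool.eq_false_iff]
      intro hcu
      obtain ⟨k, hkO, hxk⟩ := hUc.mp hcu
      obtain ⟨hkk, hknc⟩ := (hOmem k).mp hkO
      exact hknc ((hiff k ((hmem k).mpr hkk)).mp ((hcont k).mpr hxk))
    rw [hall, hnu, hq]
    simp
  · rw [decide_eq_false hq, Bool.eq_false_iff]
    intro hcontra
    obtain ⟨hc1, hc2⟩ := Bool.and_eq_true_iff.mp hcontra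
    have hnotU : U.contains x = false := by simpa using hc1
    refine hq (vn_filter_eq_of_iff hsub hn ?_)
    intro k hkL
    constructor
    · intro hck
      by_contra hknc
      have hkO : k ∈ O := (hOmem k).mpr ⟨(hmem k).mp hkL, hknc⟩
      have htrue : U.contains x = true := hUc.mpr ⟨k, hkO, (hcont k).mp hck⟩
      rw [hnotU] at htrue
      exact Bool.false_ne_true htrue
    · intro hkc
      rcases List.mem_cons.mp hkc with rfl | hkrest
      · exact (hcont k).mpr hx
      · exact (List.all_eq_true.mp hc2) k hkrest

-- the signature filter localizes to the first chosen set
theorem vn_E_filter (d : PySem.Dict String (List Int)) (L : List String) (k0 : String)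
    (rest : List String) (hn : L.Nodup) (hsub : (k0 :: rest).Sublist L) :
    (PySem.Set.ofList (L.flatMap (fun k => vn_S d k))).filter
        (fun x => (L.filter (fun k => (vn_S d k).contains x)) == (k0 :: rest))
      = (vn_S d k0).filter (fun x => (L.filter (fun k => (vn_S d k).contains x)) == (k0 :: rest)) := by
  obtain ⟨r₁, r₂, hL, hk0, hrest⟩ := List.cons_sublist_iff.mp hsub
  subst hL
  set q : Int → Bool := fun x => (( (r₁ ++ r₂).filter (fun k => (vn_S d k).contains x)) == (k0 :: rest)) with hqdef
  have hnodup := List.nodup_append.mp hn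
  have hdisj : ∀ a, a ∈ r₁ → a ∈ r₂ → False := by
    intro a h1 h2
    have hd := hnodup.2.2
    first
    | exact hd h1 h2
    | exact hd a h1 h2
    | exact absurd h2 (hd h1)
    | exact absurd h2 (hd a h1)
    | exact hd a h1 a h2 rfl
  have hcnd : (k0 :: rest).Nodup := hsub.nodup hn
  have hq' : ∀ x, q x = true → ∀ k ∈ r₁ ++ r₂, ((vn_S d k).contains x = true ↔ k ∈ (k0 :: rest)) := by
    intro x hx
    rw [hqdef] at hx
    simp only [vn_beq_eq, decide_eq_true_eq] at hx
    exact vn_iff_of_filter_eq hx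
  have hcont : ∀ k (x : Int), (vn_S d k).contains x = true ↔ x ∈ vn_S d k := by
    intro k x
    simp [PySem.Set.contains]
  have hqS : ∀ x, q x = true → x ∈ vn_S d k0 := by
    intro x hx
    exact (hcont k0 x).mp ((hq' x hx k0 (List.mem_append_left _ hk0)).mpr List.mem_cons_self)
  have honly : ∀ k, k ∈ r₁ → k ≠ k0 → ∀ x, q x = true → ¬ x ∈ vn_S d k := by
    intro k hk1 hkne x hx hxk
    have : k ∈ (k0 :: rest) := (hq' x hx k (List.mem_append_left _ hk1)).mp ((hcont k x).mpr hxk)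
    rcases List.mem_cons.mp this with rfl | hkr
    · exact hkne rfl
    · exact hdisj k hk1 (hrest.subset hkr)
  rw [List.flatMap_append, vn_filter_ofList, List.filter_append]
  have habs : PySem.Set.ofList ((r₁.flatMap (fun k => vn_S d k)).filter q
        ++ (r₂.flatMap (fun k => vn_S d k)).filter q)
      = PySem.Set.ofList ((r₁.flatMap (fun k => vn_S d k)).filter q) := by
    refine vn_ofList_append_absorb _ _ fun x hxm => ?_
    have hxq : q x = true := (List.mem_filter.mp hxm).2
    refine List.mem_filter.mpr ⟨?_, hxq⟩
    exact List.mem_flatMap.mpr ⟨k0, hk0, hqS x hxq⟩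
  rw [habs, List.filter_flatMap]
  have hcong : r₁.flatMap (fun k => (vn_S d k).filter q)
      = r₁.flatMap (fun k => if k = k0 then (vn_S d k0).filter q else []) := by
    refine List.flatMap_congr fun k hk => ?_
    by_cases hkk : k = k0
    · subst hkk; rw [if_pos rfl]
    · rw [if_neg hkk]
      rw [List.filter_eq_nil_iff]
      intro a ha hqa
      exact honly k hk hkk a hqa ha
  rw [hcong, vn_flatMap_single hnodup.1 hk0]
  exact PySem.Set.ofList_eq_self_of_nodup _ (List.Nodup.filter _ (vn_S_nodup d k0))

-- ===== VERDICT (by name: the statement is the Claim_ definition above) =====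
theorem venn_names_spec : Claim_equal_venn_names := by
  intro named_sets _
  unfold Spec_venn_names
  show venn_names named_sets = venn_names_alt named_sets
  rw [venn_names, venn_names_alt]
  simp only []
  rw [PySem.List.foldl_append_eq_flatMap, PySem.List.foldl_append_eq_flatMap, List.nil_append,
    List.nil_append]
  set d := PySem.Dict.ofList named_sets with hd
  set L := PySem.List.sorted d.keys (fun k => k) false with hL
  have hperm : L.Perm d.keys := PySem.List.sorted_perm _ _ _
  have hnL : L.Nodup := (hperm.nodup_iff).mpr (PySem.Dict.nodup_keys_ofList _)
  have hmemL : ∀ k, k ∈ L ↔ k ∈ d.keys := fun k => hperm.mem_iff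
  refine List.flatMap_congr fun i hi => ?_
  have h1 : 1 ≤ i := (PySem.List.mem_pyRange_one.mp hi).1
  refine List.map_congr_left fun c hc => ?_
  obtain ⟨hsub, hlen⟩ := (PySem.List.mem_combinations_iff _ _ c).mp hc
  have hcne : c ≠ [] := by
    intro h
    subst h
    simp only [List.length_nil] at hlen
    omega
  obtain ⟨k0, rest, rfl⟩ := List.exists_cons_of_ne_nil hcne
  simp only [Prod.mk.injEq]
  refine ⟨by trivial, by trivial, ?_⟩
  rw [vn_A_side d L k0 rest hnL hmemL hsub, vn_B_side d L (k0 :: rest)]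
  exact (vn_E_filter d L k0 rest hnL hsub).symm
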